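-- pv_equiv track=rewrite | github.com/daniagongora/repo-escuela | analisis/semanal9.py | calculate_sales_sequence
-- ===== SOURCE A (Python) =====
-- def calculate_sales_sequence(buildings):
--     n = len(buildings)
--     max_values = [[0] * (n+2) for _ in range(n+2)]
--     choices = [[0] * (n+2) for _ in range(n+2)]
--
--     for i in range(1, n+1):
--         max_values[i][i] = buildings[i-1]
--         choices[i][i] = i
--
--     for length in range(2, n+1):
--         for i in range(1, n-length+2):
--             j = i + length - 1
--             max_values[i][j] = max_values[i+1][j] + (length * buildings[i-1])
--             choices[i][j] = i
--             for k in range(i+1, j):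
--                 value = max_values[i][k] + max_values[k+1][j] + ((length-1) * buildings[k-1])
--                 if value > max_values[i][j]:
--                     max_values[i][j] = value
--                     choices[i][j] = k
--
--     sequence = []
--     def get_sales_sequence(i, j):
--         if i == j:
--             sequence.append(i-1)
--         else:
--             k = choices[i][j]
--             get_sales_sequence(i, k)
--             get_sales_sequence(k+1, j)
--     get_sales_sequence(1, n)
--
--     return max_values[1][n], sequence
-- ===== SOURCE B (Python) =====
-- def calculate_sales_sequence(buildings):
--     n = len(buildings)
--     memo = {}
--     get = memo.get
--
--     def solve(i, j):
--         entry = get((i, j))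
--         if entry is not None:
--             return entry[0]
--         if i == j:
--             memo[(i, j)] = (buildings[i - 1], i)
--             return buildings[i - 1]
--         best = solve(i + 1, j) + (j - i + 1) * buildings[i - 1]
--         choice = i
--         for k in range(i + 1, j):
--             e1 = get((i, k))
--             left = e1[0] if e1 is not None else solve(i, k)
--             e2 = get((k + 1, j))
--             right = e2[0] if e2 is not None else solve(k + 1, j)
--             cand = left + right + (j - i) * buildings[k - 1]
--             if cand > best:
--                 best = cand
--                 choice = k
--         memo[(i, j)] = (best, choice)
--         return best
--
--     total = solve(1, n)
--
--     sequence = []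
--     stack = [(1, n)]
--     while stack:
--         i, j = stack.pop()
--         if i == j:
--             sequence.append(i - 1)
--         else:
--             k = memo[(i, j)][1]
--             stack.append((k + 1, j))
--             stack.append((i, k))
--     return total, sequence
-- ===== Notes on version B (the rewrite author's own statement) =====
-- stated objective: alternative
-- what changed: Replaces the bottom-up 2D-table interval DP with top-down memoized recursion over intervals (a dict keyed by (i,j) caching value and split choice) and replaces the recursive reconstruction with an iterative explicit-stack walk; same recurrence and tie-breaking, so identical results.
import Mathlib
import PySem

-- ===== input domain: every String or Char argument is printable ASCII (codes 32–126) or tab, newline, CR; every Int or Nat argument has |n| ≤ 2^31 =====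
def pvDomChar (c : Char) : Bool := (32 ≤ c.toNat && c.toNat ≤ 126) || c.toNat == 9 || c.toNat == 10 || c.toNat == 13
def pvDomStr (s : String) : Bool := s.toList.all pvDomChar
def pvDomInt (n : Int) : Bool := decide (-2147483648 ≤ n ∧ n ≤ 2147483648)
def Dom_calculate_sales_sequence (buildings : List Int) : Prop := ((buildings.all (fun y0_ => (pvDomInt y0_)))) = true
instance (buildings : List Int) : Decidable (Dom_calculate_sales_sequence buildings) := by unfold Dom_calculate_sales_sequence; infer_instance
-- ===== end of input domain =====

-- B replaces A's bottom-up 2D-table interval DP by top-down memoized recursion plus an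
-- iterative explicit-stack reconstruction (objective: alternative decomposition, same cost).

-- ===== PORT A =====
-- buildings[i-1]; every access made in the algorithm is in range for nonempty input
def pvGetA (bs : List Int) (i : Int) : Int := (PySem.List.pyGet? bs (i - 1)).getD 0

-- max_values / choices are the two tables; an assignment t[a][b] = v is a pointwise function update
def pvUpd (t : Int → Int → Int) (a b v : Int) : Int → Int → Int :=
  fun x y => if x = a ∧ y = b then v else t x y

-- the first loop: for i in range(1, n+1): max_values[i][i] = buildings[i-1]; choices[i][i] = i
def pvInitA (bs : List Int) (n : Int) : ((Int → Int → Int) × (Int → Int → Int)) :=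
  (PySem.List.pyRange 1 (n + 1) 1).foldl
    (fun st i => (pvUpd st.1 i i (pvGetA bs i), pvUpd st.2 i i i))
    (fun _ _ => 0, fun _ _ => 0)

-- the inner 'for k in range(i+1, j)' loop
def pvKLoopA (bs : List Int) (len i j : Int) (st : (Int → Int → Int) × (Int → Int → Int)) :
    ((Int → Int → Int) × (Int → Int → Int)) :=
  (PySem.List.pyRange (i + 1) j 1).foldl
    (fun st k =>
      let v := st.1 i k + st.1 (k + 1) j + (len - 1) * pvGetA bs k
      if v > st.1 i j then (pvUpd st.1 i j v, pvUpd st.2 i j k) else st)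
    st

-- the 'for i in range(1, n-length+2)' loop
def pvILoopA (bs : List Int) (n len : Int) (st : (Int → Int → Int) × (Int → Int → Int)) :
    ((Int → Int → Int) × (Int → Int → Int)) :=
  (PySem.List.pyRange 1 (n - len + 2) 1).foldl
    (fun st i =>
      let j := i + len - 1
      pvKLoopA bs len i j
        (pvUpd st.1 i j (st.1 (i + 1) j + len * pvGetA bs i), pvUpd st.2 i j i))
    st

-- the 'for length in range(2, n+1)' loop, after the initialisation loop
def pvFillA (bs : List Int) (n : Int) : ((Int → Int → Int) × (Int → Int → Int)) :=
  (PySem.List.pyRange 2 (n + 1) 1).foldl (fun st len => pvILoopA bs n len st) (pvInitA bs n)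

-- get_sales_sequence, fuelled (the Python recursion's depth is at most n on the inputs admitted by Pre_)
def pvSeqA (c : Int → Int → Int) : Nat → Int → Int → List Int
  | 0, _, _ => []
  | f + 1, i, j =>
    if i = j then [i - 1]
    else pvSeqA c f i (c i j) ++ pvSeqA c f (c i j + 1) j

def calculate_sales_sequence (buildings : List Int) : Int × List Int :=
  let n : Int := buildings.length
  let st := pvFillA buildings n
  (st.1 1 n, pvSeqA st.2 n.toNat 1 n)

-- ===== PORT B =====
-- solve(i, j): memoized recursion; the memo maps (i, j) to (best value, chosen split).
-- Fuelled: the recursion depth is at most the interval size, so fuel n suffices on Pre_ inputs.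
def pvSolveB (bs : List Int) :
    Nat → PySem.Dict (Int × Int) (Int × Int) → Int → Int →
      Int × PySem.Dict (Int × Int) (Int × Int)
  | 0, m, _, _ => (0, m)
  | f + 1, m, i, j =>
    if (PySem.Dict.get? m (i, j)).isSome = true then
      (((PySem.Dict.get? m (i, j)).getD (0, 0)).1, m)
    else
      if i = j then
        (pvGetA bs i, PySem.Dict.insert m (i, j) (pvGetA bs i, i))
      else
        let r0 := pvSolveB bs f m (i + 1) j
        let r :=
          (PySem.List.pyRange (i + 1) j 1).foldl
            (fun (p : (Int × Int) × PySem.Dict (Int × Int) (Int × Int)) k =>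
              let rl :=
                if (PySem.Dict.get? p.2 (i, k)).isSome = true then
                  (((PySem.Dict.get? p.2 (i, k)).getD (0, 0)).1, p.2)
                else pvSolveB bs f p.2 i k
              let rr :=
                if (PySem.Dict.get? rl.2 (k + 1, j)).isSome = true then
                  (((PySem.Dict.get? rl.2 (k + 1, j)).getD (0, 0)).1, rl.2)
                else pvSolveB bs f rl.2 (k + 1) j
              let cand := rl.1 + rr.1 + (j - i) * pvGetA bs k
              if cand > p.1.1 then ((cand, k), rr.2) else (p.1, rr.2))
            ((r0.1 + (j - i + 1) * pvGetA bs i, i), r0.2)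
        (r.1.1, PySem.Dict.insert r.2 (i, j) r.1)

-- the iterative 'while stack' reconstruction; each iteration consumes one fuel (2n pops suffice)
def pvWalkB (m : PySem.Dict (Int × Int) (Int × Int)) :
    Nat → List (Int × Int) → List Int → List Int
  | 0, _, acc => acc
  | _ + 1, [], acc => acc
  | f + 1, (i, j) :: st, acc =>
    if i = j then pvWalkB m f st (acc ++ [i - 1])
    else
      let k := ((PySem.Dict.get? m (i, j)).getD (0, 0)).2
      pvWalkB m f ((i, k) :: (k + 1, j) :: st) acc

def calculate_sales_sequence_alt (buildings : List Int) : Int × List Int :=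
  let n : Int := buildings.length
  let r := pvSolveB buildings n.toNat PySem.Dict.empty 1 n
  (r.1, pvWalkB r.2 (2 * n.toNat) [(1, n)] [])

-- ===== PRECONDITION & SPEC =====
-- Pre_ excludes only the empty list, on which A's reconstruction recurses forever (RecursionError).
def Pre_calculate_sales_sequence (buildings : List Int) : Prop := buildings ≠ []
instance (buildings : List Int) : Decidable (Pre_calculate_sales_sequence buildings) := by
  unfold Pre_calculate_sales_sequence; infer_instance

def pvWitness_calculate_sales_sequence : List Int := [3, 1, 2]

def Spec_calculate_sales_sequence (buildings : List Int) (out : Int × List Int) : Prop :=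
  out = calculate_sales_sequence_alt buildings
instance (buildings : List Int) (out : Int × List Int) :
    Decidable (Spec_calculate_sales_sequence buildings out) := by
  unfold Spec_calculate_sales_sequence; infer_instance

-- ===== CLAIM (what is proved, stated in full; the proofs are below) =====
def Claim_equal_calculate_sales_sequence : Prop :=
  ∀ (buildings : List Int), Dom_calculate_sales_sequence buildings →
    Pre_calculate_sales_sequence buildings →
    Spec_calculate_sales_sequence buildings (calculate_sales_sequence buildings)

-- ===== LEMMAS AND PROOFS =====

-- The common mathematical specification: (value, choice) of interval [i, j], by fuel.
def pvV (bs : List Int) : Nat → Int → Int → Int × Int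
  | 0, _, _ => (0, 0)
  | f + 1, i, j =>
    if i = j then (pvGetA bs i, i)
    else
      (PySem.List.pyRange (i + 1) j 1).foldl
        (fun p k =>
          let cand := (pvV bs f i k).1 + (pvV bs f (k + 1) j).1 + (j - i) * pvGetA bs k
          if cand > p.1 then (cand, k) else p)
        ((pvV bs f (i + 1) j).1 + (j - i + 1) * pvGetA bs i, i)

def pvVc (bs : List Int) (i j : Int) : Int × Int := pvV bs ((j - i).toNat + 1) i j

def pvChoice (bs : List Int) (i j : Int) : Int := (pvVc bs i j).2

def pvInner (bs : List Int) (i j : Int) (p : Int × Int) (k : Int) : Int × Int :=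
  let cand := (pvVc bs i k).1 + (pvVc bs (k + 1) j).1 + (j - i) * pvGetA bs k
  if cand > p.1 then (cand, k) else p

-- the spec sequence, by fuel
def pvS (bs : List Int) : Nat → Int → Int → List Int
  | 0, _, _ => []
  | f + 1, i, j =>
    if i = j then [i - 1]
    else pvS bs f i (pvChoice bs i j) ++ pvS bs f (pvChoice bs i j + 1) j

def pvSc (bs : List Int) (i j : Int) : List Int := pvS bs ((j - i).toNat + 1) i j

theorem pvV_succ (bs : List Int) (f : Nat) (i j : Int) :
    pvV bs (f + 1) i j =
      if i = j then (pvGetA bs i, i)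
      else
        (PySem.List.pyRange (i + 1) j 1).foldl
          (fun p k =>
            let cand := (pvV bs f i k).1 + (pvV bs f (k + 1) j).1 + (j - i) * pvGetA bs k
            if cand > p.1 then (cand, k) else p)
          ((pvV bs f (i + 1) j).1 + (j - i + 1) * pvGetA bs i, i) := rfl

theorem pvS_succ (bs : List Int) (f : Nat) (i j : Int) :
    pvS bs (f + 1) i j =
      if i = j then [i - 1]
      else pvS bs f i (pvChoice bs i j) ++ pvS bs f (pvChoice bs i j + 1) j := rfl

theorem pvV_fuel (bs : List Int) :
    ∀ s f g i j, i ≤ j → (j - i).toNat = s → s < f → s < g →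
      pvV bs f i j = pvV bs g i j := by
  intro s
  induction s using Nat.strong_induction_on with
  | _ s IH =>
    intro f g i j hij hs hf hg
    match f, g with
    | f' + 1, g' + 1 =>
      by_cases hij' : i = j
      · rw [pvV_succ, pvV_succ, if_pos hij', if_pos hij']
      · have hlt : i < j := lt_of_le_of_ne hij hij'
        rw [pvV_succ, pvV_succ, if_neg hij', if_neg hij']
        have hinit : (pvV bs f' (i + 1) j).1 = (pvV bs g' (i + 1) j).1 := by
          rw [IH (j - (i + 1)).toNat (by omega) f' g' (i + 1) j (by omega) rfl (by omega)
            (by omega)]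
        rw [hinit]
        apply PySem.List.foldl_congr_mem
        intro acc k hk
        rw [PySem.List.mem_pyRange_one] at hk
        have h1 : pvV bs f' i k = pvV bs g' i k :=
          IH (k - i).toNat (by omega) f' g' i k (by omega) rfl (by omega) (by omega)
        have h2 : pvV bs f' (k + 1) j = pvV bs g' (k + 1) j :=
          IH (j - (k + 1)).toNat (by omega) f' g' (k + 1) j (by omega) rfl (by omega)
            (by omega)
        rw [h1, h2]

theorem pvVc_base (bs : List Int) (i : Int) : pvVc bs i i = (pvGetA bs i, i) := by
  simp [pvVc, pvV]

theorem pvVc_step (bs : List Int) (i j : Int) (h : i < j) :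
    pvVc bs i j =
      (PySem.List.pyRange (i + 1) j 1).foldl (pvInner bs i j)
        ((pvVc bs (i + 1) j).1 + (j - i + 1) * pvGetA bs i, i) := by
  have hne : i ≠ j := ne_of_lt h
  show pvV bs ((j - i).toNat + 1) i j = _
  obtain ⟨t, ht⟩ : ∃ t, (j - i).toNat = t + 1 := ⟨(j - i).toNat - 1, by omega⟩
  rw [ht, pvV_succ, if_neg hne]
  have hinit : (pvV bs (t + 1) (i + 1) j).1 = (pvVc bs (i + 1) j).1 := by
    rw [pvV_fuel bs (j - (i + 1)).toNat (t + 1) ((j - (i + 1)).toNat + 1) (i + 1) j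
      (by omega) rfl (by omega) (by omega)]
    rfl
  rw [hinit]
  apply PySem.List.foldl_congr_mem
  intro acc k hk
  rw [PySem.List.mem_pyRange_one] at hk
  have h1 : pvV bs (t + 1) i k = pvVc bs i k :=
    pvV_fuel bs (k - i).toNat _ _ i k (by omega) rfl (by omega) (by omega)
  have h2 : pvV bs (t + 1) (k + 1) j = pvVc bs (k + 1) j :=
    pvV_fuel bs (j - (k + 1)).toNat _ _ (k + 1) j (by omega) rfl (by omega) (by omega)
  rw [h1, h2]
  rfl

-- the second component of a pvInner fold is the initial choice or an element of the list
theorem pvInner_snd (bs : List Int) (i j : Int) :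
    ∀ (l : List Int) (p : Int × Int),
      (l.foldl (pvInner bs i j) p).2 = p.2 ∨ (l.foldl (pvInner bs i j) p).2 ∈ l := by
  intro l
  induction l with
  | nil => intro p; left; rfl
  | cons k t IHt =>
    intro p
    simp only [List.foldl_cons]
    rcases IHt (pvInner bs i j p k) with hc | hc
    · by_cases hbr : (pvVc bs i k).1 + (pvVc bs (k + 1) j).1 + (j - i) * pvGetA bs k > p.1
      · right; rw [hc]; simp [pvInner, hbr]
      · left; rw [hc]; simp [pvInner, hbr]
    · right; exact List.mem_cons_of_mem _ hc

theorem pvChoice_bound (bs : List Int) (i j : Int) (h : i < j) :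
    i ≤ pvChoice bs i j ∧ pvChoice bs i j < j := by
  unfold pvChoice
  rw [pvVc_step bs i j h]
  rcases pvInner_snd bs i j (PySem.List.pyRange (i + 1) j 1)
      ((pvVc bs (i + 1) j).1 + (j - i + 1) * pvGetA bs i, i) with hc | hc
  · rw [hc]; omega
  · rw [PySem.List.mem_pyRange_one] at hc; omega

theorem pvSc_base (bs : List Int) (i : Int) : pvSc bs i i = [i - 1] := by
  simp [pvSc, pvS]

theorem pvS_fuel (bs : List Int) :
    ∀ s f i j, i ≤ j → (j - i).toNat = s → s < f → pvS bs f i j = pvSc bs i j := by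
  intro s
  induction s using Nat.strong_induction_on with
  | _ s IH =>
    intro f i j hij hs hf
    match f with
    | f' + 1 =>
      by_cases hij' : i = j
      · rw [pvS_succ, if_pos hij', pvSc, hij']
        have : (j - j).toNat = 0 := by omega
        rw [this, pvS_succ, if_pos rfl]
      · have hlt : i < j := lt_of_le_of_ne hij hij'
        obtain ⟨hk1, hk2⟩ := pvChoice_bound bs i j hlt
        obtain ⟨t, ht⟩ : ∃ t, s = t + 1 := ⟨s - 1, by omega⟩
        have hRc : pvSc bs i j = pvS bs (t + 1 + 1) i j := by unfold pvSc; rw [hs, ht]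
        rw [hRc, pvS_succ, pvS_succ, if_neg hij', if_neg hij']
        rw [IH (pvChoice bs i j - i).toNat (by omega) f' i (pvChoice bs i j) (by omega)
            rfl (by omega),
          IH (j - (pvChoice bs i j + 1)).toNat (by omega) f' (pvChoice bs i j + 1) j
            (by omega) rfl (by omega),
          IH (pvChoice bs i j - i).toNat (by omega) (t + 1) i (pvChoice bs i j) (by omega)
            rfl (by omega),
          IH (j - (pvChoice bs i j + 1)).toNat (by omega) (t + 1) (pvChoice bs i j + 1) j
            (by omega) rfl (by omega)]

theorem pvSc_step (bs : List Int) (i j : Int) (h : i < j) :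
    pvSc bs i j = pvSc bs i (pvChoice bs i j) ++ pvSc bs (pvChoice bs i j + 1) j := by
  have hne : i ≠ j := ne_of_lt h
  obtain ⟨hk1, hk2⟩ := pvChoice_bound bs i j h
  show pvS bs ((j - i).toNat + 1) i j = _
  rw [pvS_succ, if_neg hne]
  rw [pvS_fuel bs (pvChoice bs i j - i).toNat ((j - i).toNat) i (pvChoice bs i j) (by omega)
    rfl (by omega),
    pvS_fuel bs (j - (pvChoice bs i j + 1)).toNat ((j - i).toNat) (pvChoice bs i j + 1) j
    (by omega) rfl (by omega)]

-- ---------- A-side: the table fill computes pvVc ----------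

theorem pvUpd_self (t : Int → Int → Int) (a b v : Int) : pvUpd t a b v a b = v := by
  simp [pvUpd]

theorem pvUpd_ne (t : Int → Int → Int) (a b v x y : Int) (h : ¬(x = a ∧ y = b)) :
    pvUpd t a b v x y = t x y := by
  simp [pvUpd, h]

theorem pvUpd_upd (t : Int → Int → Int) (a b v w : Int) :
    pvUpd (pvUpd t a b v) a b w = pvUpd t a b w := by
  funext x y
  by_cases h : x = a ∧ y = b
  · simp [pvUpd, h.1, h.2]
  · simp [pvUpd, h]

-- untouched diagonal cells of the initialisation loop
theorem pvInitA_pres (bs : List Int) :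
    ∀ (l : List Int) (st : (Int → Int → Int) × (Int → Int → Int)) (x y : Int),
      (∀ z ∈ l, ¬(x = z ∧ y = z)) →
      ((l.foldl (fun st i => (pvUpd st.1 i i (pvGetA bs i), pvUpd st.2 i i i)) st).1 x y
          = st.1 x y ∧
        (l.foldl (fun st i => (pvUpd st.1 i i (pvGetA bs i), pvUpd st.2 i i i)) st).2 x y
          = st.2 x y) := by
  intro l
  induction l with
  | nil => intro st x y _; exact ⟨rfl, rfl⟩
  | cons z t IHt =>
    intro st x y h
    simp only [List.foldl_cons]
    obtain ⟨h1, h2⟩ := IHt (pvUpd st.1 z z (pvGetA bs z), pvUpd st.2 z z z) x y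
      (fun w hw => h w (List.mem_cons_of_mem _ hw))
    refine ⟨?_, ?_⟩
    · rw [h1]; exact pvUpd_ne _ _ _ _ _ _ (h z (List.mem_cons_self))
    · rw [h2]; exact pvUpd_ne _ _ _ _ _ _ (h z (List.mem_cons_self))

theorem pvInitA_mem (bs : List Int) :
    ∀ (l : List Int) (st : (Int → Int → Int) × (Int → Int → Int)) (x : Int), x ∈ l →
      ((l.foldl (fun st i => (pvUpd st.1 i i (pvGetA bs i), pvUpd st.2 i i i)) st).1 x x
          = pvGetA bs x ∧
        (l.foldl (fun st i => (pvUpd st.1 i i (pvGetA bs i), pvUpd st.2 i i i)) st).2 x x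
          = x) := by
  intro l
  induction l with
  | nil => intro st x hx; cases hx
  | cons z t IHt =>
    intro st x hx
    simp only [List.foldl_cons]
    by_cases hxt : x ∈ t
    · exact IHt _ x hxt
    · have hxz : x = z := by
        rcases List.mem_cons.mp hx with h | h
        · exact h
        · exact absurd h hxt
      subst hxz
      obtain ⟨h1, h2⟩ := pvInitA_pres bs t (pvUpd st.1 x x (pvGetA bs x), pvUpd st.2 x x x)
        x x (by intro w hw hc; exact hxt (hc.1 ▸ hw))
      rw [h1, h2]
      exact ⟨pvUpd_self _ _ _ _, pvUpd_self _ _ _ _⟩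

-- the agreement invariant: all cells of size < L, and of size L with row < I, hold pvVc
def pvAgree (bs : List Int) (n : Int) (st : (Int → Int → Int) × (Int → Int → Int))
    (L I : Int) : Prop :=
  ∀ i j, 1 ≤ i → i ≤ j → j ≤ n → (j - i + 1 < L ∨ (j - i + 1 = L ∧ i < I)) →
    st.1 i j = (pvVc bs i j).1 ∧ st.2 i j = (pvVc bs i j).2

theorem pvInitA_agree (bs : List Int) (n : Int) : pvAgree bs n (pvInitA bs n) 2 1 := by
  intro i j h1 h2 h3 h4
  have hij : i = j := by omega
  subst hij
  have hmem : i ∈ PySem.List.pyRange 1 (n + 1) 1 := by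
    rw [PySem.List.mem_pyRange_one]; omega
  obtain ⟨e1, e2⟩ := pvInitA_mem bs (PySem.List.pyRange 1 (n + 1) 1)
    (fun _ _ => 0, fun _ _ => 0) i hmem
  unfold pvInitA
  rw [pvVc_base]
  exact ⟨e1, e2⟩

-- the body of the k-loop, named for the proofs
def pvStepA (bs : List Int) (L i j : Int)
    (st : (Int → Int → Int) × (Int → Int → Int)) (k : Int) :
    ((Int → Int → Int) × (Int → Int → Int)) :=
  let v := st.1 i k + st.1 (k + 1) j + (L - 1) * pvGetA bs k
  if v > st.1 i j then (pvUpd st.1 i j v, pvUpd st.2 i j k) else st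

theorem pvKLoopA_eq (bs : List Int) (L i j : Int)
    (st : (Int → Int → Int) × (Int → Int → Int)) :
    pvKLoopA bs L i j st = (PySem.List.pyRange (i + 1) j 1).foldl (pvStepA bs L i j) st := rfl

-- the k-loop only rewrites the single cell (i, j), tracking pvInner
theorem pvKLoopA_aux (bs : List Int) (n L i j : Int) (hj : j = i + L - 1)
    (hi : 1 ≤ i) (hjn : j ≤ n) (st : (Int → Int → Int) × (Int → Int → Int))
    (hst : ∀ x y, 1 ≤ x → x ≤ y → y ≤ n → y - x + 1 < L →
      st.1 x y = (pvVc bs x y).1 ∧ st.2 x y = (pvVc bs x y).2) :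
    ∀ (l : List Int), (∀ k ∈ l, i < k ∧ k < j) → ∀ (b c : Int),
      l.foldl (pvStepA bs L i j) (pvUpd st.1 i j b, pvUpd st.2 i j c) =
      (pvUpd st.1 i j (l.foldl (pvInner bs i j) (b, c)).1,
        pvUpd st.2 i j (l.foldl (pvInner bs i j) (b, c)).2) := by
  intro l
  induction l with
  | nil => intro _ b c; rfl
  | cons k t IHt =>
    intro hmem b c
    obtain ⟨hk1, hk2⟩ := hmem k (List.mem_cons_self)
    have hread1 : pvUpd st.1 i j b i k = (pvVc bs i k).1 := by
      rw [pvUpd_ne _ _ _ _ _ _ (by intro hh; omega)]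
      exact (hst i k hi (by omega) (by omega) (by omega)).1
    have hread2 : pvUpd st.1 i j b (k + 1) j = (pvVc bs (k + 1) j).1 := by
      rw [pvUpd_ne _ _ _ _ _ _ (by intro hh; omega)]
      exact (hst (k + 1) j (by omega) (by omega) hjn (by omega)).1
    have hLji : L - 1 = j - i := by omega
    have hstep : pvStepA bs L i j (pvUpd st.1 i j b, pvUpd st.2 i j c) k =
        (pvUpd st.1 i j (pvInner bs i j (b, c) k).1,
          pvUpd st.2 i j (pvInner bs i j (b, c) k).2) := by
      show (let v := pvUpd st.1 i j b i k + pvUpd st.1 i j b (k + 1) j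
              + (L - 1) * pvGetA bs k
            if v > pvUpd st.1 i j b i j then
              (pvUpd (pvUpd st.1 i j b) i j v, pvUpd (pvUpd st.2 i j c) i j k)
            else (pvUpd st.1 i j b, pvUpd st.2 i j c)) = _
      rw [show pvUpd st.1 i j b i j = b from pvUpd_self _ _ _ _, hread1, hread2, hLji]
      by_cases hbr : (pvVc bs i k).1 + (pvVc bs (k + 1) j).1 + (j - i) * pvGetA bs k > b
      · rw [if_pos hbr, pvUpd_upd, pvUpd_upd]
        simp only [pvInner]
        rw [if_pos hbr]
      · rw [if_neg hbr]
        simp only [pvInner]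
        rw [if_neg hbr]
    simp only [List.foldl_cons]
    rw [hstep]
    exact IHt (fun w hw => hmem w (List.mem_cons_of_mem _ hw)) _ _

-- one i-iteration fills cell (i, i+L-1) with pvVc and touches nothing else
theorem pvCellA (bs : List Int) (n L i j : Int) (h2 : 2 ≤ L) (hj : j = i + L - 1)
    (hi : 1 ≤ i) (hjn : j ≤ n) (st : (Int → Int → Int) × (Int → Int → Int))
    (hst : ∀ x y, 1 ≤ x → x ≤ y → y ≤ n → y - x + 1 < L →
      st.1 x y = (pvVc bs x y).1 ∧ st.2 x y = (pvVc bs x y).2) :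
    pvKLoopA bs L i j
        (pvUpd st.1 i j (st.1 (i + 1) j + L * pvGetA bs i), pvUpd st.2 i j i) =
      (pvUpd st.1 i j (pvVc bs i j).1, pvUpd st.2 i j (pvVc bs i j).2) := by
  have hlt : i < j := by omega
  have hb : st.1 (i + 1) j + L * pvGetA bs i
      = (pvVc bs (i + 1) j).1 + (j - i + 1) * pvGetA bs i := by
    rw [(hst (i + 1) j (by omega) (by omega) hjn (by omega)).1]
    have : (L : Int) = j - i + 1 := by omega
    rw [this]
  rw [pvKLoopA_eq, hb,
    pvKLoopA_aux bs n L i j hj hi hjn st hst (PySem.List.pyRange (i + 1) j 1)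
      (by intro k hk; rw [PySem.List.mem_pyRange_one] at hk; omega) _ i,
    ← pvVc_step bs i j hlt]

-- the i-loop establishes the invariant for all rows
theorem pvILoopA_aux (bs : List Int) (n L : Int) (h2 : 2 ≤ L) :
    ∀ (d : Nat) (I : Int) (st : (Int → Int → Int) × (Int → Int → Int)),
      1 ≤ I → (n - L + 2 - I).toNat = d → pvAgree bs n st L I →
      pvAgree bs n
        ((PySem.List.pyRange I (n - L + 2) 1).foldl
          (fun st i =>
            let j := i + L - 1
            pvKLoopA bs L i j
              (pvUpd st.1 i j (st.1 (i + 1) j + L * pvGetA bs i), pvUpd st.2 i j i))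
          st) L (n - L + 2) := by
  intro d
  induction d with
  | zero =>
    intro I st hI hd hst
    rw [PySem.List.pyRange_one_eq_nil (by omega)]
    intro x y a1 a2 a3 a4
    exact hst x y a1 a2 a3 (by omega)
  | succ d IHd =>
    intro I st hI hd hst
    have hIlt : I < n - L + 2 := by omega
    rw [PySem.List.pyRange_one_cons hIlt]
    simp only [List.foldl_cons]
    have hcell := pvCellA bs n L I (I + L - 1) h2 rfl hI (by omega) st
      (fun x y b1 b2 b3 b4 => hst x y b1 b2 b3 (Or.inl (by omega)))
    rw [hcell]
    apply IHd (I + 1) _ (by omega) (by omega)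
    intro x y a1 a2 a3 a4
    by_cases hxy : x = I ∧ y = I + L - 1
    · obtain ⟨hx, hy⟩ := hxy
      subst hx; subst hy
      exact ⟨pvUpd_self _ _ _ _, pvUpd_self _ _ _ _⟩
    · have hold := hst x y a1 a2 a3 (by omega)
      constructor
      · show pvUpd st.1 I (I + L - 1) (pvVc bs I (I + L - 1)).1 x y = _
        rw [pvUpd_ne _ _ _ _ _ _ hxy]; exact hold.1
      · show pvUpd st.2 I (I + L - 1) (pvVc bs I (I + L - 1)).2 x y = _
        rw [pvUpd_ne _ _ _ _ _ _ hxy]; exact hold.2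

-- the length-loop fills every cell
theorem pvFillA_aux (bs : List Int) (n : Int) :
    ∀ (d : Nat) (L : Int) (st : (Int → Int → Int) × (Int → Int → Int)),
      2 ≤ L → (n + 1 - L).toNat = d → pvAgree bs n st L 1 →
      pvAgree bs n
        ((PySem.List.pyRange L (n + 1) 1).foldl (fun st len => pvILoopA bs n len st) st)
        (n + 1) 1 := by
  intro d
  induction d with
  | zero =>
    intro L st hL hd hst
    rw [PySem.List.pyRange_one_eq_nil (by omega)]
    intro x y a1 a2 a3 a4
    exact hst x y a1 a2 a3 (by omega)
  | succ d IHd =>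
    intro L st hL hd hst
    have hLlt : L < n + 1 := by omega
    rw [PySem.List.pyRange_one_cons hLlt]
    simp only [List.foldl_cons]
    apply IHd (L + 1) _ (by omega) (by omega)
    have hmain : pvAgree bs n (pvILoopA bs n L st) L (n - L + 2) := by
      unfold pvILoopA
      exact pvILoopA_aux bs n L hL (n - L + 2 - 1).toNat 1 st (by omega)
        (by omega) (fun x y a1 a2 a3 a4 => hst x y a1 a2 a3 (by omega))
    intro x y a1 a2 a3 a4
    exact hmain x y a1 a2 a3 (by omega)

theorem pvFillA_agree (bs : List Int) (n : Int) :
    pvAgree bs n (pvFillA bs n) (n + 1) 1 := by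
  unfold pvFillA
  exact pvFillA_aux bs n (n + 1 - 2).toNat 2 (pvInitA bs n) (by omega) rfl
    (pvInitA_agree bs n)

-- A's reconstruction with any choice table that agrees with pvChoice
theorem pvSeqA_eq (bs : List Int) (n : Int) (c : Int → Int → Int)
    (hc : ∀ x y, 1 ≤ x → x ≤ y → y ≤ n → c x y = pvChoice bs x y) :
    ∀ (s f : Nat) (i j : Int), (j - i).toNat = s → s < f → 1 ≤ i → i ≤ j → j ≤ n →
      pvSeqA c f i j = pvSc bs i j := by
  intro s
  induction s using Nat.strong_induction_on with
  | _ s IH =>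
    intro f i j hs hf h1 h2 h3
    match f with
    | f' + 1 =>
      by_cases hij : i = j
      · subst hij
        rw [pvSc_base]
        simp [pvSeqA]
      · have hlt : i < j := lt_of_le_of_ne h2 hij
        have hcc : c i j = pvChoice bs i j := hc i j h1 h2 h3
        obtain ⟨hk1, hk2⟩ := pvChoice_bound bs i j hlt
        show (if i = j then [i - 1]
          else pvSeqA c f' i (c i j) ++ pvSeqA c f' (c i j + 1) j) = _
        rw [if_neg hij, hcc,
          IH (pvChoice bs i j - i).toNat (by omega) f' i (pvChoice bs i j) rfl (by omega)
            h1 (by omega) (by omega),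
          IH (j - (pvChoice bs i j + 1)).toNat (by omega) f' (pvChoice bs i j + 1) j rfl
            (by omega) (by omega) (by omega) h3,
          ← pvSc_step bs i j hlt]

-- ---------- B-side: the memoized recursion computes pvVc ----------

-- every memo entry is correct
def pvGoodM (bs : List Int) (m : PySem.Dict (Int × Int) (Int × Int)) : Prop :=
  ∀ p vc, PySem.Dict.get? m p = some vc → vc = pvVc bs p.1 p.2

-- the memo contains the children of every recorded split
def pvClosedM (bs : List Int) (m : PySem.Dict (Int × Int) (Int × Int)) : Prop :=
  ∀ i j vc, PySem.Dict.get? m (i, j) = some vc → i < j →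
    (i < vc.2 → PySem.Dict.get? m (i, vc.2) = some (pvVc bs i vc.2)) ∧
    (vc.2 + 1 < j → PySem.Dict.get? m (vc.2 + 1, j) = some (pvVc bs (vc.2 + 1) j))

def pvExt (m m' : PySem.Dict (Int × Int) (Int × Int)) : Prop :=
  ∀ p v, PySem.Dict.get? m p = some v → PySem.Dict.get? m' p = some v

theorem pvExt_refl (m : PySem.Dict (Int × Int) (Int × Int)) : pvExt m m :=
  fun _ _ h => h

theorem pvExt_trans {m1 m2 m3 : PySem.Dict (Int × Int) (Int × Int)}
    (h1 : pvExt m1 m2) (h2 : pvExt m2 m3) : pvExt m1 m3 :=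
  fun p v h => h2 p v (h1 p v h)

theorem pvExt_insert (m : PySem.Dict (Int × Int) (Int × Int)) (k : Int × Int) (w : Int × Int)
    (hv : ∀ v, PySem.Dict.get? m k = some v → v = w) : pvExt m (PySem.Dict.insert m k w) := by
  intro p v h
  rw [PySem.Dict.get?_insert]
  by_cases hp : p = k
  · subst hp; rw [if_pos rfl, hv v h]
  · rw [if_neg hp]; exact h

theorem pvGoodM_insert (bs : List Int) (m : PySem.Dict (Int × Int) (Int × Int))
    (k : Int × Int) (w : Int × Int) (hm : pvGoodM bs m) (hw : w = pvVc bs k.1 k.2) :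
    pvGoodM bs (PySem.Dict.insert m k w) := by
  intro p vc h
  rw [PySem.Dict.get?_insert] at h
  by_cases hp : p = k
  · rw [if_pos hp] at h; cases h; subst hp; exact hw
  · rw [if_neg hp] at h; exact hm p vc h

theorem pvClosedM_insert (bs : List Int) (m : PySem.Dict (Int × Int) (Int × Int))
    (k : Int × Int) (w : Int × Int) (hm : pvClosedM bs m)
    (hext : pvExt m (PySem.Dict.insert m k w))
    (hnew : k.1 < k.2 →
      (k.1 < w.2 →
        PySem.Dict.get? (PySem.Dict.insert m k w) (k.1, w.2) = some (pvVc bs k.1 w.2)) ∧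
      (w.2 + 1 < k.2 →
        PySem.Dict.get? (PySem.Dict.insert m k w) (w.2 + 1, k.2)
          = some (pvVc bs (w.2 + 1) k.2))) :
    pvClosedM bs (PySem.Dict.insert m k w) := by
  intro i j vc h hij
  rw [PySem.Dict.get?_insert] at h
  by_cases hp : ((i, j) : Int × Int) = k
  · rw [if_pos hp] at h
    cases h
    subst hp
    exact hnew hij
  · rw [if_neg hp] at h
    obtain ⟨c1, c2⟩ := hm i j vc h hij
    exact ⟨fun hc => hext _ _ (c1 hc), fun hc => hext _ _ (c2 hc)⟩

-- the loop's 'memo hit or recurse' lookup, named for the proofs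
def pvLookB (bs : List Int) (f : Nat) (m : PySem.Dict (Int × Int) (Int × Int))
    (x y : Int) : Int × PySem.Dict (Int × Int) (Int × Int) :=
  if (PySem.Dict.get? m (x, y)).isSome = true then
    (((PySem.Dict.get? m (x, y)).getD (0, 0)).1, m)
  else pvSolveB bs f m x y

-- the body of B's k-loop, named for the proofs
def pvStepB (bs : List Int) (f : Nat) (i j : Int)
    (p : (Int × Int) × PySem.Dict (Int × Int) (Int × Int)) (k : Int) :
    (Int × Int) × PySem.Dict (Int × Int) (Int × Int) :=
  let rl := pvLookB bs f p.2 i k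
  let rr := pvLookB bs f rl.2 (k + 1) j
  let cand := rl.1 + rr.1 + (j - i) * pvGetA bs k
  if cand > p.1.1 then ((cand, k), rr.2) else (p.1, rr.2)

theorem pvSolveB_succ (bs : List Int) (f : Nat) (m : PySem.Dict (Int × Int) (Int × Int))
    (i j : Int) :
    pvSolveB bs (f + 1) m i j =
      if (PySem.Dict.get? m (i, j)).isSome = true then
        (((PySem.Dict.get? m (i, j)).getD (0, 0)).1, m)
      else
        if i = j then (pvGetA bs i, PySem.Dict.insert m (i, j) (pvGetA bs i, i))
        else
          let r0 := pvSolveB bs f m (i + 1) j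
          let r := (PySem.List.pyRange (i + 1) j 1).foldl (pvStepB bs f i j)
            ((r0.1 + (j - i + 1) * pvGetA bs i, i), r0.2)
          (r.1.1, PySem.Dict.insert r.2 (i, j) r.1) := rfl

theorem pvLookB_correct (bs : List Int) (f : Nat) (m : PySem.Dict (Int × Int) (Int × Int))
    (x y : Int) (hg : pvGoodM bs m) (hc : pvClosedM bs m)
    (hsolve : pvGoodM bs m → pvClosedM bs m →
      (pvSolveB bs f m x y).1 = (pvVc bs x y).1 ∧ pvGoodM bs (pvSolveB bs f m x y).2 ∧
      pvClosedM bs (pvSolveB bs f m x y).2 ∧ pvExt m (pvSolveB bs f m x y).2 ∧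
      PySem.Dict.get? (pvSolveB bs f m x y).2 (x, y) = some (pvVc bs x y)) :
    (pvLookB bs f m x y).1 = (pvVc bs x y).1 ∧ pvGoodM bs (pvLookB bs f m x y).2 ∧
    pvClosedM bs (pvLookB bs f m x y).2 ∧ pvExt m (pvLookB bs f m x y).2 ∧
    PySem.Dict.get? (pvLookB bs f m x y).2 (x, y) = some (pvVc bs x y) := by
  unfold pvLookB
  cases hget : PySem.Dict.get? m (x, y) with
  | some e =>
    have he : e = pvVc bs x y := hg (x, y) e hget
    rw [if_pos (show ((some e : Option (Int × Int)).isSome = true) from rfl)]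
    exact ⟨by rw [he]; rfl, hg, hc, pvExt_refl m, by rw [hget, he]⟩
  | none =>
    rw [if_neg (show ¬ ((none : Option (Int × Int)).isSome = true) from by simp)]
    exact hsolve hg hc

-- the k-loop of B, tracking pvInner on the first component
theorem pvFoldB_aux (bs : List Int) (f' : Nat) (i j : Int) (hij : i < j)
    (hsolve : ∀ (m : PySem.Dict (Int × Int) (Int × Int)) (x y : Int),
      i ≤ x → x ≤ y → y ≤ j → (y - x).toNat < (j - i).toNat →
      pvGoodM bs m → pvClosedM bs m →
        (pvSolveB bs f' m x y).1 = (pvVc bs x y).1 ∧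
        pvGoodM bs (pvSolveB bs f' m x y).2 ∧ pvClosedM bs (pvSolveB bs f' m x y).2 ∧
        pvExt m (pvSolveB bs f' m x y).2 ∧
        PySem.Dict.get? (pvSolveB bs f' m x y).2 (x, y) = some (pvVc bs x y)) :
    ∀ (l : List Int), (∀ k ∈ l, i < k ∧ k < j) →
      ∀ (q : Int × Int) (m : PySem.Dict (Int × Int) (Int × Int)),
        pvGoodM bs m → pvClosedM bs m →
        (l.foldl (pvStepB bs f' i j) (q, m)).1 = l.foldl (pvInner bs i j) q ∧
        pvGoodM bs (l.foldl (pvStepB bs f' i j) (q, m)).2 ∧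
        pvClosedM bs (l.foldl (pvStepB bs f' i j) (q, m)).2 ∧
        pvExt m (l.foldl (pvStepB bs f' i j) (q, m)).2 ∧
        (∀ k ∈ l,
          PySem.Dict.get? (l.foldl (pvStepB bs f' i j) (q, m)).2 (i, k)
            = some (pvVc bs i k) ∧
          PySem.Dict.get? (l.foldl (pvStepB bs f' i j) (q, m)).2 (k + 1, j)
            = some (pvVc bs (k + 1) j)) := by
  intro l
  induction l with
  | nil =>
    intro _ q m hg hc
    refine ⟨rfl, hg, hc, pvExt_refl m, ?_⟩
    intro k hk; cases hk
  | cons k t IHt =>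
    intro hmem q m hg hc
    obtain ⟨hk1, hk2⟩ := hmem k (List.mem_cons_self)
    obtain ⟨e1, g1, c1, x1, p1⟩ := pvLookB_correct bs f' m i k hg hc
      (fun hg' hc' => hsolve m i k (le_refl i) (by omega) (by omega) (by omega) hg' hc')
    obtain ⟨e2, g2, c2, x2, p2⟩ := pvLookB_correct bs f' (pvLookB bs f' m i k).2 (k + 1) j
      g1 c1
      (fun hg' hc' => hsolve (pvLookB bs f' m i k).2 (k + 1) j (by omega) (by omega)
        (le_refl j) (by omega) hg' hc')
    have hstep : pvStepB bs f' i j (q, m) k =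
        (pvInner bs i j q k,
          (pvLookB bs f' (pvLookB bs f' m i k).2 (k + 1) j).2) := by
      show (let rl := pvLookB bs f' m i k
            let rr := pvLookB bs f' rl.2 (k + 1) j
            let cand := rl.1 + rr.1 + (j - i) * pvGetA bs k
            if cand > q.1 then ((cand, k), rr.2) else (q, rr.2)) = _
      simp only []
      rw [e1, e2]
      by_cases hbr : (pvVc bs i k).1 + (pvVc bs (k + 1) j).1 + (j - i) * pvGetA bs k > q.1
      · rw [if_pos hbr]
        simp only [pvInner]
        rw [if_pos hbr]
      · rw [if_neg hbr]
        simp only [pvInner]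
        rw [if_neg hbr]
    simp only [List.foldl_cons]
    rw [hstep]
    obtain ⟨E, G, C, X, P⟩ := IHt (fun w hw => hmem w (List.mem_cons_of_mem _ hw))
      (pvInner bs i j q k) (pvLookB bs f' (pvLookB bs f' m i k).2 (k + 1) j).2 g2 c2
    refine ⟨E, G, C, pvExt_trans (pvExt_trans x1 x2) X, ?_⟩
    intro w hw
    rcases List.mem_cons.mp hw with hwk | hwt
    · subst hwk
      exact ⟨X _ _ (x2 _ _ p1), X _ _ p2⟩
    · exact P w hwt

theorem pvSolveB_correct (bs : List Int) :
    ∀ (s f : Nat), s < f → ∀ (m : PySem.Dict (Int × Int) (Int × Int)) (i j : Int),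
      i ≤ j → (j - i).toNat = s → pvGoodM bs m → pvClosedM bs m →
      (pvSolveB bs f m i j).1 = (pvVc bs i j).1 ∧
      pvGoodM bs (pvSolveB bs f m i j).2 ∧ pvClosedM bs (pvSolveB bs f m i j).2 ∧
      pvExt m (pvSolveB bs f m i j).2 ∧
      PySem.Dict.get? (pvSolveB bs f m i j).2 (i, j) = some (pvVc bs i j) := by
  intro s
  induction s using Nat.strong_induction_on with
  | _ s IH =>
    intro f hf m i j hij hs hg hc
    match f, hf with
    | f' + 1, hf =>
      cases hm : PySem.Dict.get? m (i, j) with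
      | some vc =>
        have hcont : (PySem.Dict.get? m (i, j)).isSome = true := by rw [hm]; rfl
        rw [pvSolveB_succ, if_pos hcont]
        have hvc : vc = pvVc bs i j := hg (i, j) vc hm
        refine ⟨?_, hg, hc, pvExt_refl m, ?_⟩
        · show ((PySem.Dict.get? m (i, j)).getD (0, 0)).1 = _
          rw [hm, hvc]; rfl
        · show PySem.Dict.get? m (i, j) = _
          rw [hm, hvc]
      | none =>
        have hcont : ¬ (PySem.Dict.get? m (i, j)).isSome = true := by rw [hm]; simp
        by_cases heq : i = j
        · subst heq
          rw [pvSolveB_succ, if_neg hcont, if_pos rfl]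
          have hext : pvExt m (PySem.Dict.insert m (i, i) (pvGetA bs i, i)) :=
            pvExt_insert m (i, i) _ (by intro v hv; rw [hm] at hv; cases hv)
          refine ⟨by rw [pvVc_base], pvGoodM_insert bs m _ _ hg (by rw [pvVc_base]),
            pvClosedM_insert bs m _ _ hc hext (by intro hlt; omega),
            hext, ?_⟩
          rw [PySem.Dict.get?_insert_self, pvVc_base]
        · have hlt : i < j := lt_of_le_of_ne hij heq
          rw [pvSolveB_succ, if_neg hcont, if_neg heq]
          obtain ⟨e0, g0, c0, x0, p0⟩ := IH (j - (i + 1)).toNat (by omega) f' (by omega)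
            m (i + 1) j (by omega) rfl hg hc
          have hsolve := fun (m' : PySem.Dict (Int × Int) (Int × Int)) (x y : Int)
              (h1 : i ≤ x) (h2 : x ≤ y) (h3 : y ≤ j) (h4 : (y - x).toNat < (j - i).toNat)
              (hg' : pvGoodM bs m') (hc' : pvClosedM bs m') =>
            IH (y - x).toNat (by omega) f' (by omega) m' x y h2 rfl hg' hc'
          obtain ⟨E, G, C, X, P⟩ := pvFoldB_aux bs f' i j hlt hsolve
            (PySem.List.pyRange (i + 1) j 1)
            (by intro w hw; rw [PySem.List.mem_pyRange_one] at hw; omega)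
            ((pvSolveB bs f' m (i + 1) j).1 + (j - i + 1) * pvGetA bs i, i)
            (pvSolveB bs f' m (i + 1) j).2 g0 c0
          set r := (PySem.List.pyRange (i + 1) j 1).foldl (pvStepB bs f' i j)
            (((pvSolveB bs f' m (i + 1) j).1 + (j - i + 1) * pvGetA bs i, i),
              (pvSolveB bs f' m (i + 1) j).2) with hr
          have hr1 : r.1 = pvVc bs i j := by
            rw [E, e0, pvVc_step bs i j hlt]
          have hext2 : pvExt r.2 (PySem.Dict.insert r.2 (i, j) r.1) :=
            pvExt_insert r.2 (i, j) r.1 (by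
              intro v hv
              rw [G (i, j) v hv, hr1])
          have hchoice : (pvVc bs i j).2 = pvChoice bs i j := rfl
          obtain ⟨hcb1, hcb2⟩ := pvChoice_bound bs i j hlt
          refine ⟨by show r.1.1 = _; rw [hr1],
            pvGoodM_insert bs r.2 (i, j) r.1 G (by rw [hr1]),
            pvClosedM_insert bs r.2 (i, j) r.1 C hext2 ?_,
            pvExt_trans x0 (pvExt_trans X hext2),
            by show PySem.Dict.get? (PySem.Dict.insert r.2 (i, j) r.1) (i, j) = _
               rw [PySem.Dict.get?_insert_self, hr1]⟩
          have hc2 : r.1.2 = pvChoice bs i j := by rw [hr1]; rfl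
          intro _
          constructor
          · intro hcl
            rw [hc2] at hcl ⊢
            have hmemc : pvChoice bs i j ∈ PySem.List.pyRange (i + 1) j 1 := by
              rw [PySem.List.mem_pyRange_one]
              exact ⟨by omega, by omega⟩
            exact hext2 _ _ (P _ hmemc).1
          · intro hcr
            rw [hc2] at hcr ⊢
            by_cases hci : pvChoice bs i j = i
            · rw [hci]
              exact hext2 _ _ (X _ _ p0)
            · have hmemc : pvChoice bs i j ∈ PySem.List.pyRange (i + 1) j 1 := by
                rw [PySem.List.mem_pyRange_one]
                constructor <;> omega
              exact hext2 _ _ (P _ hmemc).2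

-- ---------- B-side: the stack walk follows the recorded choices ----------

theorem pvWalkB_aux (bs : List Int) (m : PySem.Dict (Int × Int) (Int × Int))
    (hc : pvClosedM bs m) :
    ∀ (s : Nat) (i j : Int), (j - i).toNat = s → i ≤ j →
      (i < j → PySem.Dict.get? m (i, j) = some (pvVc bs i j)) →
      ∀ (f : Nat) (st : List (Int × Int)) (acc : List Int),
        pvWalkB m (2 * s + 1 + f) ((i, j) :: st) acc
          = pvWalkB m f st (acc ++ pvSc bs i j) := by
  intro s
  induction s using Nat.strong_induction_on with
  | _ s IH =>
    intro i j hs hij hpres f st acc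
    by_cases heq : i = j
    · subst heq
      have hs0 : s = 0 := by omega
      subst hs0
      rw [show 2 * 0 + 1 + f = f + 1 from by omega, pvSc_base]
      show (if i = i then pvWalkB m f st (acc ++ [i - 1])
        else pvWalkB m f
          ((i, ((PySem.Dict.get? m (i, i)).getD (0, 0)).2)
            :: (((PySem.Dict.get? m (i, i)).getD (0, 0)).2 + 1, i) :: st) acc) = _
      rw [if_pos rfl]
    · have hlt : i < j := lt_of_le_of_ne hij heq
      have hpr := hpres hlt
      set c := pvChoice bs i j with hcdef
      obtain ⟨hcb1, hcb2⟩ := pvChoice_bound bs i j hlt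
      obtain ⟨hch1, hch2⟩ := hc i j (pvVc bs i j) hpr hlt
      have hs1 : 1 ≤ s := by omega
      obtain ⟨t, ht⟩ : ∃ t, 2 * s + 1 + f = (2 * s + f) + 1 := ⟨0, by omega⟩
      rw [ht]
      show (if i = j then pvWalkB m (2 * s + f) st (acc ++ [i - 1])
        else pvWalkB m (2 * s + f)
          ((i, ((PySem.Dict.get? m (i, j)).getD (0, 0)).2)
            :: (((PySem.Dict.get? m (i, j)).getD (0, 0)).2 + 1, j) :: st) acc) = _
      rw [if_neg heq, hpr]
      show pvWalkB m (2 * s + f) ((i, c) :: (c + 1, j) :: st) acc = _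
      have hsz : (c - i).toNat + (j - (c + 1)).toNat = s - 1 := by omega
      have hfuel : 2 * s + f
          = 2 * (c - i).toNat + 1 + (2 * (j - (c + 1)).toNat + 1 + f) := by omega
      rw [hfuel,
        IH (c - i).toNat (by omega) i c rfl (by omega)
          (fun hic => hch1 hic),
        IH (j - (c + 1)).toNat (by omega) (c + 1) j rfl (by omega)
          (fun hcj => hch2 hcj),
        List.append_assoc, ← pvSc_step bs i j hlt]

-- ===== VERDICT (by name: the statement is the Claim_ definition above) =====
theorem calculate_sales_sequence_spec : Claim_equal_calculate_sales_sequence := by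
  intro bs _ hpre
  unfold Spec_calculate_sales_sequence
  have hlen : 0 < bs.length := List.length_pos_iff.mpr hpre
  have hn : 1 ≤ (bs.length : Int) := by omega
  set n : Int := (bs.length : Int) with hndef
  have hagree := pvFillA_agree bs n
  have hA1 : (pvFillA bs n).1 1 n = (pvVc bs 1 n).1 :=
    (hagree 1 n (by omega) hn (le_refl n) (by omega)).1
  have hAseq : pvSeqA (pvFillA bs n).2 n.toNat 1 n = pvSc bs 1 n :=
    pvSeqA_eq bs n (pvFillA bs n).2
      (fun x y h1 h2 h3 => (hagree x y h1 h2 h3 (by omega)).2)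
      (n - 1).toNat n.toNat 1 n (by omega) (by omega) (by omega) hn (le_refl n)
  have hgood : pvGoodM bs PySem.Dict.empty := by
    intro p vc h; rw [PySem.Dict.get?_empty] at h; cases h
  have hclosed : pvClosedM bs PySem.Dict.empty := by
    intro i j vc h; rw [PySem.Dict.get?_empty] at h; cases h
  obtain ⟨E, G, C, _, P⟩ := pvSolveB_correct bs (n - 1).toNat n.toNat (by omega)
    PySem.Dict.empty 1 n hn (by omega) hgood hclosed
  have hwalk : pvWalkB (pvSolveB bs n.toNat PySem.Dict.empty 1 n).2 (2 * n.toNat)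
      [(1, n)] [] = pvSc bs 1 n := by
    rw [show 2 * n.toNat = 2 * (n - 1).toNat + 1 + 1 from by omega,
      pvWalkB_aux bs _ C (n - 1).toNat 1 n (by omega) hn (fun _ => P) 1 [] []]
    show ([] : List Int) ++ pvSc bs 1 n = pvSc bs 1 n
    exact List.nil_append _
  show calculate_sales_sequence bs = calculate_sales_sequence_alt bs
  show ((pvFillA bs n).1 1 n, pvSeqA (pvFillA bs n).2 n.toNat 1 n)
    = ((pvSolveB bs n.toNat PySem.Dict.empty 1 n).1,
        pvWalkB (pvSolveB bs n.toNat PySem.Dict.empty 1 n).2 (2 * n.toNat) [(1, n)] [])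
  rw [hA1, hAseq, E, hwalk]
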